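-- pv_equiv track=rewrite | github.com/CodecoolGlobal/hangman-python-galnora | hangman.py | letter_replace
-- ===== SOURCE A (Python) =====
-- def letter_replace(word, letter_list, secret_word, letter):
--     index=[]
--     word=word.lower()
--     for x in range(len(word)):
--         if word[x] == letter:
--             index.append(x*2)
--     for y in range(len(secret_word)):
--         for z in index:
--             if y == z:
--                 if not y == 2:
--                     s= list(secret_word)
--                     s[y] = letter
--                     secret_word= "".join(s)
--                 else:
--                     s= list(secret_word)
--                     s[y] = letter.upper()
--                     secret_word= "".join(s)
--
--     return letter_list, secret_word
-- ===== SOURCE B (Python) =====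
-- def letter_replace(word, letter_list, secret_word, letter):
--     s = list(secret_word)
--     for i, ch in enumerate(word.lower()):
--         if ch == letter and 2 * i < len(s):
--             s[2 * i] = letter
--     return letter_list, "".join(s)
-- ===== Notes on version B (the rewrite author's own statement) =====
-- stated objective: simpler
-- what changed: B converts the secret word to a list once and, in a single pass over the lowercased guess word, writes the letter directly at each doubled index before one final join, instead of A's loop over every secret position with an inner scan of the whole index list and a full list/join string rebuild on every hit; B also drops A's accidental uppercasing at position 2 (see differs).
-- intended difference: On inputs whose lowercased word has the guessed letter at position 1 (so the doubled index 2 falls inside a secret word of length >= 3) and letter.upper() != letter, A writes the UPPERCASE letter at position 2 of the secret word while writing it lowercase at every other revealed position; B writes the lowercase letter uniformly, which is the intended reveal behaviour. — e.g. on letter_replace("aa", ([], ("xyz", "a"))): A returns ([], "ayA"), B returns ([], "aya")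
import Mathlib
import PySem

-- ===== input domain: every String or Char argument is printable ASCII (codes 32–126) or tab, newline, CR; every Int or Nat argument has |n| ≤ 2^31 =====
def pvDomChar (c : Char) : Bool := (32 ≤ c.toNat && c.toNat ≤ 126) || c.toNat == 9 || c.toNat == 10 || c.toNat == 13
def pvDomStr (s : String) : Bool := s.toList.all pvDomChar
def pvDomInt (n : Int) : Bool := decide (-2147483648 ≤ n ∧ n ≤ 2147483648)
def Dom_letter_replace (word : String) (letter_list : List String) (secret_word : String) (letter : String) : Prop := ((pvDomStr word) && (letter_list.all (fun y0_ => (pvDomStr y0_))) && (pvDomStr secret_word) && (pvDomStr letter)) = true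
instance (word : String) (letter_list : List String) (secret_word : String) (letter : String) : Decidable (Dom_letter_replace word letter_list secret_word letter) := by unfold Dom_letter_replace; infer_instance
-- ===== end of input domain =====

-- B rebuilds the secret word in ONE pass over the guess word, writing directly at the doubled
-- indices, instead of A's scan of every secret position against the whole index list with a
-- string rebuilt on each hit; B also does not uppercase the letter at position 2 (see D_ below).

-- ===== PORT A =====
def letter_replace (word : String) (letter_list : List String) (secret_word : String) (letter : String) : List String × String :=
  -- word = word.lower()
  let word := PySem.Str.lower word
  -- index = []; for x in range(len(word)): if word[x] == letter: index.append(x*2)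
  let index : List Int :=
    (PySem.List.pyRange 0 (PySem.Str.len word) 1).foldl
      (fun idx x =>
        if String.ofList [PySem.List.pyGetD word.toList x ' '] = letter then idx ++ [x * 2]
        else idx) []
  -- for y in range(len(secret_word)): for z in index: if y == z: (rebuild secret_word)
  let secret_word :=
    (PySem.List.pyRange 0 (PySem.Str.len secret_word) 1).foldl
      (fun sec y =>
        index.foldl
          (fun sec2 z =>
            if y = z then
              if ¬ y = 2 then
                -- s = list(secret_word); s[y] = letter; secret_word = "".join(s)
                PySem.Str.join "" ((sec2.toList.map (fun c => String.ofList [c])).set y.toNat letter)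
              else
                -- s = list(secret_word); s[y] = letter.upper(); secret_word = "".join(s)
                PySem.Str.join "" ((sec2.toList.map (fun c => String.ofList [c])).set y.toNat (PySem.Str.upper letter))
            else sec2)
          sec)
      secret_word
  (letter_list, secret_word)

-- ===== PORT B =====
def letter_replace_alt (word : String) (letter_list : List String) (secret_word : String) (letter : String) : List String × String :=
  -- s = list(secret_word)
  let s0 := secret_word.toList.map (fun c => String.ofList [c])
  -- for i, ch in enumerate(word.lower()): if ch == letter and 2*i < len(s): s[2*i] = letter
  let s1 :=
    (PySem.List.enumerate (PySem.Str.lower word).toList).foldl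
      (fun s p =>
        if String.ofList [p.2] = letter ∧ 2 * p.1 < (s.length : Int) then
          s.set (2 * p.1).toNat letter
        else s) s0
  -- return letter_list, "".join(s)
  (letter_list, PySem.Str.join "" s1)

-- ===== PRECONDITION & SPEC =====
-- On inputs whose lowercased word contains the guessed letter at position 1 (so the doubled index 2
-- lands inside a secret word of length ≥ 3) and letter.upper() != letter, A writes the UPPERCASE
-- letter at position 2 of the secret word while writing it lowercase at every other revealed
-- position; B writes the lowercase letter uniformly, which is the intended reveal behaviour.
def D_letter_replace (word : String) (_letter_list : List String) (secret_word : String) (letter : String) : Prop :=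
  ((PySem.Str.lower word).toList.drop 1).take 1 = letter.toList ∧
  letter.toList.length = 1 ∧
  3 ≤ secret_word.toList.length ∧
  PySem.Str.upper letter ≠ letter
instance (word : String) (letter_list : List String) (secret_word : String) (letter : String) : Decidable (D_letter_replace word letter_list secret_word letter) := by unfold D_letter_replace; infer_instance

def Spec_letter_replace (word : String) (letter_list : List String) (secret_word : String) (letter : String) (out : List String × String) : Prop := ¬ D_letter_replace word letter_list secret_word letter → out = letter_replace_alt word letter_list secret_word letter
instance (word : String) (letter_list : List String) (secret_word : String) (letter : String) (out : List String × String) : Decidable (Spec_letter_replace word letter_list secret_word letter out) := by unfold Spec_letter_replace; infer_instance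

def pvDiffWitness_letter_replace : String × List String × String × String := ("aa", ([], ("xyz", "a")))
def pvDiffWitnessOut_letter_replace : (List String × String) × (List String × String) := (([], "ayA"), ([], "aya"))

-- ===== CLAIM (what is proved, stated in full; the proofs are below) =====
def Claim_unchanged_letter_replace : Prop := ∀ (word : String) (letter_list : List String) (secret_word : String) (letter : String), Dom_letter_replace word letter_list secret_word letter → Spec_letter_replace word letter_list secret_word letter (letter_replace word letter_list secret_word letter)
def Claim_changed_letter_replace : Prop := Dom_letter_replace (pvDiffWitness_letter_replace.1) (pvDiffWitness_letter_replace.2.1) (pvDiffWitness_letter_replace.2.2.1) (pvDiffWitness_letter_replace.2.2.2) ∧ D_letter_replace (pvDiffWitness_letter_replace.1) (pvDiffWitness_letter_replace.2.1) (pvDiffWitness_letter_replace.2.2.1) (pvDiffWitness_letter_replace.2.2.2) ∧ letter_replace (pvDiffWitness_letter_replace.1) (pvDiffWitness_letter_replace.2.1) (pvDiffWitness_letter_replace.2.2.1) (pvDiffWitness_letter_replace.2.2.2) = pvDiffWitnessOut_letter_replace.1 ∧ letter_replace_alt (pvDiffWitness_letter_replace.1) (pvDiffWitness_letter_replace.2.1)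 (pvDiffWitness_letter_replace.2.2.1) (pvDiffWitness_letter_replace.2.2.2) = pvDiffWitnessOut_letter_replace.2 ∧ pvDiffWitnessOut_letter_replace.1 ≠ pvDiffWitnessOut_letter_replace.2
def Claim_exact_letter_replace : Prop := ∀ (word : String) (letter_list : List String) (secret_word : String) (letter : String), Dom_letter_replace word letter_list secret_word letter → D_letter_replace word letter_list secret_word letter → letter_replace word letter_list secret_word letter ≠ letter_replace_alt word letter_list secret_word letter

-- ===== LEMMAS AND PROOFS =====

-- 'for z in index: if y == z: <apply g>' collapses to a single membership test when g is idempotent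
theorem pv_foldl_if_mem {σ : Type} (l : List Int) (y : Int) (g : σ → σ) (s : σ)
    (hg : ∀ t, g (g t) = g t) :
    l.foldl (fun s2 z => if y = z then g s2 else s2) s = if y ∈ l then g s else s := by
  induction l generalizing s with
  | nil => simp
  | cons z zs ih =>
    by_cases hz : y = z
    · subst hz
      simp [ih, hg]
    · simp [hz, ih]

-- explode-set-join on the character level
theorem pv_join_set_toList (cl : List Char) (k : Nat) (u : String) (d : Char) (hu : u.toList = [d]) :
    (PySem.Str.join "" ((cl.map (fun c => String.ofList [c])).set k u)).toList = cl.set k d := by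
  rw [PySem.Str.toList_join]
  have h1 : ((cl.map (fun c => String.ofList [c])).set k u).map String.toList
      = (cl.map (fun c => [c])).set k [d] := by
    rw [List.map_set, List.map_map, ← hu]
    congr 1
    simp [String.toList_ofList]
  rw [h1, List.map_set.symm]
  have h2 : ("" : String).toList = [] := rfl
  rw [h2, PySem.Chars.join_nil_singletons]

-- joining a list of singleton strings
theorem pv_join_singletons (cl : List Char) :
    PySem.Str.join "" (cl.map (fun c => String.ofList [c])) = String.ofList cl := by
  apply String.toList_inj.mp
  rw [PySem.Str.toList_join, List.map_map]
  have h1 : (String.toList ∘ fun c => String.ofList [c]) = fun c => [c] := by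
    funext c; simp [String.toList_ofList]
  have h2 : ("" : String).toList = [] := rfl
  rw [h1, h2, PySem.Chars.join_nil_singletons, String.toList_ofList]

-- A's outer loop simulated on the character level
theorem pv_A_sim (ix : List Int) (a b : String) (v : Int → Char)
    (hab : ∀ y : Int, (if ¬ y = 2 then a else b).toList = [v y])
    (ys : List Int) (sec : String) :
    (ys.foldl (fun sec y =>
        ix.foldl
          (fun sec2 z =>
            if y = z then
              if ¬ y = 2 then
                PySem.Str.join "" ((sec2.toList.map (fun c => String.ofList [c])).set y.toNat a)
              else
                PySem.Str.join "" ((sec2.toList.map (fun c => String.ofList [c])).set y.toNat b)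
            else sec2)
          sec) sec).toList
    = ys.foldl (fun cl y => if y ∈ ix then cl.set y.toNat (v y) else cl) sec.toList := by
  induction ys generalizing sec with
  | nil => rfl
  | cons y ys ih =>
    simp only [List.foldl_cons]
    have hg : ∀ t : String,
        (fun sec2 => if ¬ y = 2 then
            PySem.Str.join "" ((sec2.toList.map (fun c => String.ofList [c])).set y.toNat a)
          else
            PySem.Str.join "" ((sec2.toList.map (fun c => String.ofList [c])).set y.toNat b))
        ((fun sec2 => if ¬ y = 2 then
            PySem.Str.join "" ((sec2.toList.map (fun c => String.ofList [c])).set y.toNat a)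
          else
            PySem.Str.join "" ((sec2.toList.map (fun c => String.ofList [c])).set y.toNat b)) t)
        = (fun sec2 => if ¬ y = 2 then
            PySem.Str.join "" ((sec2.toList.map (fun c => String.ofList [c])).set y.toNat a)
          else
            PySem.Str.join "" ((sec2.toList.map (fun c => String.ofList [c])).set y.toNat b)) t := by
      intro t
      have hab' := hab y
      by_cases hy2 : y = 2 <;>
        simp only [hy2, if_true, if_false, not_true, not_false_iff] <;>
        · rw [pv_join_set_toList _ _ _ (v y) (by simpa [hy2] using hab')]
          rw [List.map_set, List.set_set]
    rw [pv_foldl_if_mem ix y _ sec hg, ih]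
    congr 1
    by_cases hmem : y ∈ ix
    · simp only [hmem, if_true]
      have hab' := hab y
      by_cases hy2 : y = 2
      · subst hy2
        simp only [not_true, if_false]
        rw [pv_join_set_toList _ _ _ (v 2) (by simpa using hab')]
      · simp only [hy2, not_false_iff, if_true]
        rw [pv_join_set_toList _ _ _ (v y) (by simpa [hy2] using hab')]
    · simp [hmem]

-- the character-level conditional-set loop: length and elements
theorem pv_setfold_length (ix : List Int) (v : Int → Char) (ys : List Int) (cl : List Char) :
    (ys.foldl (fun cl y => if y ∈ ix then cl.set y.toNat (v y) else cl) cl).length = cl.length := by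
  induction ys generalizing cl with
  | nil => rfl
  | cons y ys ih => simp only [List.foldl_cons]; split <;> simp [ih]

theorem pv_setfold_getElem? (ix : List Int) (v : Int → Char) (ys : List Int) (cl : List Char)
    (j : Nat) (hj : j < cl.length) (hys : ∀ y ∈ ys, 0 ≤ y) :
    (ys.foldl (fun cl y => if y ∈ ix then cl.set y.toNat (v y) else cl) cl)[j]? =
    if (j : Int) ∈ ix ∧ (j : Int) ∈ ys then some (v j) else cl[j]? := by
  induction ys generalizing cl with
  | nil => simp
  | cons y ys ih =>
    simp only [List.foldl_cons]
    have hy0 : 0 ≤ y := hys y (List.mem_cons_self ..)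
    by_cases hmem : y ∈ ix
    · rw [if_pos hmem, ih _ (by simpa using hj) (fun z hz => hys z (List.mem_cons_of_mem _ hz))]
      by_cases hA : (j : Int) ∈ ix ∧ (j : Int) ∈ ys
      · rw [if_pos hA, if_pos ⟨hA.1, List.mem_cons_of_mem _ hA.2⟩]
      · rw [if_neg hA]
        by_cases hB : (j : Int) ∈ ix ∧ (j : Int) ∈ y :: ys
        · rw [if_pos hB]
          have hjy : (j : Int) = y := by
            rcases List.mem_cons.mp hB.2 with h | h
            · exact h
            · exact absurd ⟨hB.1, h⟩ hA
          have ht : y.toNat = j := by omega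
          rw [List.getElem?_set, ht, if_pos rfl, if_pos hj, hjy]
        · rw [if_neg hB]
          have ht : y.toNat ≠ j := by
            intro h
            have h1 : (j : Int) = y := by omega
            have h2 : (j : Int) ∈ y :: ys := by rw [h1]; exact List.mem_cons_self ..
            exact hB ⟨h1 ▸ hmem, h2⟩
          rw [List.getElem?_set, if_neg ht]
    · rw [if_neg hmem, ih _ hj (fun z hz => hys z (List.mem_cons_of_mem _ hz))]
      by_cases hA : (j : Int) ∈ ix ∧ (j : Int) ∈ ys
      · rw [if_pos hA, if_pos ⟨hA.1, List.mem_cons_of_mem _ hA.2⟩]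
      · rw [if_neg hA, if_neg ?_]
        intro hB
        rcases List.mem_cons.mp hB.2 with h | h
        · exact hmem (h ▸ hB.1)
        · exact hA ⟨hB.1, h⟩

-- B's loop, element by element
theorem pv_B_fold (letter : String) (prs : List (Int × Char)) (hpos : ∀ p ∈ prs, 0 ≤ p.1) (S : List String) :
    ((prs.foldl (fun s p =>
        if String.ofList [p.2] = letter ∧ 2 * p.1 < (s.length : Int) then
          s.set (2 * p.1).toNat letter
        else s) S)).length = S.length ∧
    ∀ j : Nat, j < S.length →
      ((prs.foldl (fun s p =>
          if String.ofList [p.2] = letter ∧ 2 * p.1 < (s.length : Int) then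
            s.set (2 * p.1).toNat letter
          else s) S))[j]? =
      if (∃ p ∈ prs, String.ofList [p.2] = letter ∧ 2 * p.1 = (j : Int)) then some letter else S[j]? := by
  induction prs generalizing S with
  | nil => simp
  | cons p prs ih =>
    simp only [List.foldl_cons]
    have hp0 : 0 ≤ p.1 := hpos p (List.mem_cons_self ..)
    have hpos' : ∀ q ∈ prs, 0 ≤ q.1 := fun q hq => hpos q (List.mem_cons_of_mem _ hq)
    by_cases hc : String.ofList [p.2] = letter ∧ 2 * p.1 < (S.length : Int)
    · rw [if_pos hc]
      obtain ⟨ihl, ihe⟩ := ih hpos' (S.set (2 * p.1).toNat letter)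
      refine ⟨by simpa using ihl, ?_⟩
      intro j hj
      rw [ihe j (by simpa using hj)]
      by_cases hE : ∃ q ∈ p :: prs, String.ofList [q.2] = letter ∧ 2 * q.1 = (j : Int)
      · rw [if_pos hE]
        by_cases hR : ∃ q ∈ prs, String.ofList [q.2] = letter ∧ 2 * q.1 = (j : Int)
        · rw [if_pos hR]
        · rw [if_neg hR]
          obtain ⟨q, hq, hq1, hq2⟩ := hE
          rcases List.mem_cons.mp hq with h | h
          · subst h
            have ht : (2 * q.1).toNat = j := by omega
            rw [List.getElem?_set, ht, if_pos rfl, if_pos hj]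
          · exact absurd ⟨q, h, hq1, hq2⟩ hR
      · rw [if_neg hE, if_neg (fun ⟨q, hq, hq1, hq2⟩ => hE ⟨q, List.mem_cons_of_mem _ hq, hq1, hq2⟩)]
        have ht : (2 * p.1).toNat ≠ j := by
          intro h
          have h1 : 2 * p.1 = (j : Int) := by omega
          exact hE ⟨p, List.mem_cons_self .., hc.1, h1⟩
        rw [List.getElem?_set, if_neg ht]
    · rw [if_neg hc]
      obtain ⟨ihl, ihe⟩ := ih hpos' S
      refine ⟨ihl, ?_⟩
      intro j hj
      rw [ihe j hj]
      by_cases hR : ∃ q ∈ prs, String.ofList [q.2] = letter ∧ 2 * q.1 = (j : Int)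
      · rw [if_pos hR]
        obtain ⟨q, hq, hq1, hq2⟩ := hR
        rw [if_pos ⟨q, List.mem_cons_of_mem _ hq, hq1, hq2⟩]
      · rw [if_neg hR, if_neg ?_]
        rintro ⟨q, hq, hq1, hq2⟩
        rcases List.mem_cons.mp hq with h | h
        · subst h
          exact hc ⟨hq1, by omega⟩
        · exact hR ⟨q, h, hq1, hq2⟩

-- A's index list, in filtered form (proof-only helper)
def pvIndex (word letter : String) : List Int :=
  ((PySem.List.pyRange 0 (((PySem.Str.lower word).toList.length : Int)) 1).filter
      (fun x => decide (String.ofList [PySem.List.pyGetD (PySem.Str.lower word).toList x ' '] = letter))).map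
    (fun x => x * 2)

theorem pv_index_eq (word letter : String) :
    (PySem.List.pyRange 0 (PySem.Str.len (PySem.Str.lower word)) 1).foldl
      (fun idx x =>
        if String.ofList [PySem.List.pyGetD (PySem.Str.lower word).toList x ' '] = letter then idx ++ [x * 2]
        else idx) []
    = pvIndex word letter := by
  rw [PySem.Str.len_eq]
  have h1 : (fun (idx : List Int) (x : Int) =>
      if String.ofList [PySem.List.pyGetD (PySem.Str.lower word).toList x ' '] = letter then idx ++ [x * 2]
      else idx)
    = (fun idx x =>
      if (fun x => decide (String.ofList [PySem.List.pyGetD (PySem.Str.lower word).toList x ' '] = letter)) x = true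
      then idx ++ [(fun x => x * 2) x] else idx) := by
    funext idx x
    simp
  rw [h1, PySem.List.foldl_append_if]
  simp [pvIndex]

theorem pv_mem_index (word letter : String) (j : Int) :
    j ∈ pvIndex word letter ↔
      ∃ x ∈ PySem.List.pyRange 0 (((PySem.Str.lower word).toList.length : Int)) 1,
        String.ofList [PySem.List.pyGetD (PySem.Str.lower word).toList x ' '] = letter ∧ 2 * x = j := by
  simp only [pvIndex, List.mem_map, List.mem_filter, decide_eq_true_eq]
  constructor
  · rintro ⟨x, ⟨hx1, hx2⟩, hx3⟩
    exact ⟨x, hx1, hx2, by omega⟩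
  · rintro ⟨x, hx1, hx2, hx3⟩
    exact ⟨x, ⟨hx1, hx2⟩, by omega⟩

-- evaluation of port A's second component on the character level, for a one-character letter
theorem pv_A_eval (word : String) (ll : List String) (sec letter : String) (c : Char)
    (hc : letter.toList = [c]) :
    (letter_replace word ll sec letter).2.toList
      = (PySem.List.pyRange 0 ((sec.toList.length : Int)) 1).foldl
          (fun cl y => if y ∈ pvIndex word letter then
              cl.set y.toNat (if y = 2 then PySem.Chars.upperChar c else c) else cl)
          sec.toList := by
  have hletter : letter = String.ofList [c] := by
    rw [← hc, String.ofList_toList]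
  have hab : ∀ y : Int,
      (if ¬ y = 2 then letter else PySem.Str.upper letter).toList
        = [if y = 2 then PySem.Chars.upperChar c else c] := by
    intro y
    by_cases hy : y = 2
    · simp only [hy, not_true, if_false, if_true]
      rw [hletter]
      have : (PySem.Str.upper (String.ofList [c])).toList = PySem.Chars.upper [c] := by
        rw [PySem.Str.toList_upper, String.toList_ofList]
      rw [this]
      simp [PySem.Chars.upper]
    · simp only [hy, not_false_iff, if_true, if_false]
      exact hc
  simp only [letter_replace]
  rw [pv_index_eq word letter]
  rw [pv_A_sim (pvIndex word letter) letter (PySem.Str.upper letter)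
        (fun y => if y = 2 then PySem.Chars.upperChar c else c) hab
        (PySem.List.pyRange 0 (PySem.Str.len sec) 1) sec]
  rw [PySem.Str.len_eq]

-- evaluation of port B's second component on the character level, for a one-character letter
theorem pv_B_eval (word : String) (ll : List String) (sec letter : String) (c : Char)
    (hc : letter.toList = [c]) :
    (letter_replace_alt word ll sec letter).2.toList
      = (PySem.List.pyRange 0 ((sec.toList.length : Int)) 1).foldl
          (fun cl y => if y ∈ pvIndex word letter then cl.set y.toNat c else cl)
          sec.toList := by
  have hletter : letter = String.ofList [c] := by
    rw [← hc, String.ofList_toList]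
  have henum : PySem.List.enumerate (PySem.Str.lower word).toList
      = (PySem.List.pyRange 0 (((PySem.Str.lower word).toList.length : Int)) 1).map
          (fun x => (x, PySem.List.pyGetD (PySem.Str.lower word).toList x ' ')) := by
    rw [PySem.List.enumerate_eq_map_pyRange _ ' ', PySem.List.len_eq]
  simp only [letter_replace_alt]
  rw [henum]
  have hpos : ∀ p ∈ (PySem.List.pyRange 0 (((PySem.Str.lower word).toList.length : Int)) 1).map
      (fun x => (x, PySem.List.pyGetD (PySem.Str.lower word).toList x ' ')), 0 ≤ p.1 := by
    intro p hp
    obtain ⟨x, hx, rfl⟩ := List.mem_map.mp hp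
    have := PySem.List.mem_pyRange_one.mp hx
    omega
  obtain ⟨hlen, helem⟩ := pv_B_fold letter _ hpos (sec.toList.map (fun ch => String.ofList [ch]))
  have hEiff : ∀ j : Int,
      (∃ p ∈ (PySem.List.pyRange 0 (((PySem.Str.lower word).toList.length : Int)) 1).map
          (fun x => (x, PySem.List.pyGetD (PySem.Str.lower word).toList x ' ')),
        String.ofList [p.2] = letter ∧ 2 * p.1 = j)
      ↔ j ∈ pvIndex word letter := by
    intro j
    rw [pv_mem_index]
    constructor
    · rintro ⟨p, hp, h1, h2⟩
      obtain ⟨x, hx, rfl⟩ := List.mem_map.mp hp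
      exact ⟨x, hx, h1, h2⟩
    · rintro ⟨x, hx, h1, h2⟩
      exact ⟨(x, PySem.List.pyGetD (PySem.Str.lower word).toList x ' '), List.mem_map_of_mem hx, h1, h2⟩
  have hF : (((PySem.List.pyRange 0 (((PySem.Str.lower word).toList.length : Int)) 1).map
        (fun x => (x, PySem.List.pyGetD (PySem.Str.lower word).toList x ' '))).foldl
      (fun s p =>
        if String.ofList [p.2] = letter ∧ 2 * p.1 < (s.length : Int) then
          s.set (2 * p.1).toNat letter
        else s) (sec.toList.map (fun ch => String.ofList [ch])))
      = ((PySem.List.pyRange 0 ((sec.toList.length : Int)) 1).foldl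
          (fun cl y => if y ∈ pvIndex word letter then cl.set y.toNat c else cl)
          sec.toList).map (fun ch => String.ofList [ch]) := by
    apply List.ext_getElem?
    intro j
    by_cases hj : j < sec.toList.length
    · have hQ := pv_setfold_getElem? (pvIndex word letter) (fun _ => c)
        (PySem.List.pyRange 0 ((sec.toList.length : Int)) 1) sec.toList j hj
        (fun y hy => (PySem.List.mem_pyRange_one.mp hy).1)
      rw [helem j (by simpa using hj)]
      conv_rhs => rw [List.getElem?_map, hQ]
      have hjys : (j : Int) ∈ PySem.List.pyRange 0 ((sec.toList.length : Int)) 1 :=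
        PySem.List.mem_pyRange_one.mpr ⟨by omega, by exact_mod_cast hj⟩
      by_cases hIx : (j : Int) ∈ pvIndex word letter
      · rw [if_pos ((hEiff j).mpr hIx), if_pos ⟨hIx, hjys⟩]
        simp [hletter]
      · rw [if_neg (fun h => hIx ((hEiff j).mp h)), if_neg (fun h => hIx h.1)]
        rw [List.getElem?_map]
    · have h1 : sec.toList.length ≤ j := by omega
      rw [List.getElem?_eq_none_iff.mpr, List.getElem?_eq_none_iff.mpr]
      · rw [List.length_map, pv_setfold_length]; exact h1
      · rw [hlen, List.length_map]; exact h1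
  rw [hF, pv_join_singletons, String.toList_ofList]

-- pvIndex membership at 2 in terms of D_'s first conjunct
theorem pv_two_mem_index (word letter : String) (c : Char) (hc : letter.toList = [c])
    (hd1 : ((PySem.Str.lower word).toList.drop 1).take 1 = letter.toList) :
    (2 : Int) ∈ pvIndex word letter := by
  have hne : (PySem.Str.lower word).toList.drop 1 ≠ [] := by
    intro h
    rw [h] at hd1
    simp [hc] at hd1
  have hlen : 1 < (PySem.Str.lower word).toList.length := List.length_lt_of_drop_ne_nil hne
  rw [List.drop_eq_getElem_cons hlen] at hd1
  simp only [List.take_succ_cons, List.take_zero, hc] at hd1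
  have hw1 : (PySem.Str.lower word).toList[1] = c := by
    simpa using hd1
  apply (pv_mem_index word letter 2).mpr
  refine ⟨1, PySem.List.mem_pyRange_one.mpr ⟨by omega, by exact_mod_cast hlen⟩, ?_, by ring⟩
  rw [PySem.List.pyGetD_eq_getElem _ _ (by omega) (by exact_mod_cast hlen)]
  simp only [Int.toNat_one, hw1]
  rw [← hc, String.ofList_toList]

-- and conversely: if 2 is in the index, D_'s first conjunct holds
theorem pv_index_two_d1 (word letter : String)
    (h2 : (2 : Int) ∈ pvIndex word letter) :
    ((PySem.Str.lower word).toList.drop 1).take 1 = letter.toList := by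
  obtain ⟨x, hx, hP, hx2⟩ := (pv_mem_index word letter 2).mp h2
  have hx1 : x = 1 := by omega
  subst hx1
  have hlen : (1 : Int) < ((PySem.Str.lower word).toList.length : Int) :=
    (PySem.List.mem_pyRange_one.mp hx).2
  have hlen' : 1 < (PySem.Str.lower word).toList.length := by exact_mod_cast hlen
  rw [PySem.List.pyGetD_eq_getElem _ _ (by omega) hlen] at hP
  simp only [Int.toNat_one] at hP
  rw [List.drop_eq_getElem_cons hlen']
  simp only [List.take_succ_cons, List.take_zero]
  rw [← hP, String.toList_ofList]

-- ===== VERDICT (by name: the statement is the Claim_ definition above) =====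
theorem letter_replace_spec : Claim_unchanged_letter_replace := by
  intro word ll sec letter _hdom
  unfold Spec_letter_replace
  intro hD
  by_cases hs : ∃ c, letter.toList = [c]
  · obtain ⟨c, hc⟩ := hs
    apply Prod.ext
    · simp [letter_replace, letter_replace_alt]
    · apply String.toList_inj.mp
      rw [pv_A_eval word ll sec letter c hc, pv_B_eval word ll sec letter c hc]
      apply List.ext_getElem?
      intro j
      by_cases hj : j < sec.toList.length
      · rw [pv_setfold_getElem? _ _ _ _ j hj (fun y hy => (PySem.List.mem_pyRange_one.mp hy).1),
          pv_setfold_getElem? _ _ _ _ j hj (fun y hy => (PySem.List.mem_pyRange_one.mp hy).1)]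
        by_cases hcond : ((j : Int) ∈ pvIndex word letter ∧
            (j : Int) ∈ PySem.List.pyRange 0 ((sec.toList.length : Int)) 1)
        · rw [if_pos hcond, if_pos hcond]
          by_cases hj2 : (j : Int) = 2
          · have hup : PySem.Str.upper letter = letter := by
              by_contra hup
              apply hD
              refine ⟨pv_index_two_d1 word letter (hj2 ▸ hcond.1), by simp [hc], ?_, hup⟩
              have : j = 2 := by omega
              omega
            have hupc : PySem.Chars.upperChar c = c := by
              have h1 : (PySem.Str.upper letter).toList = letter.toList := by rw [hup]
              rw [PySem.Str.toList_upper, hc] at h1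
              simpa [PySem.Chars.upper] using h1
            simp [hj2, hupc]
          · simp [hj2]
        · rw [if_neg hcond, if_neg hcond]
      · have h1 : sec.toList.length ≤ j := by omega
        rw [List.getElem?_eq_none_iff.mpr, List.getElem?_eq_none_iff.mpr]
        · rw [pv_setfold_length]; exact h1
        · rw [pv_setfold_length]; exact h1
  · -- the letter is not a single character: nothing matches, both sides return the input unchanged
    have hP : ∀ ch : Char, String.ofList [ch] ≠ letter := by
      intro ch h
      exact hs ⟨ch, by rw [← h, String.toList_ofList]⟩
    have hA : letter_replace word ll sec letter = (ll, sec) := by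
      simp only [letter_replace]
      rw [pv_index_eq word letter]
      have hidx : pvIndex word letter = [] := by
        unfold pvIndex
        rw [List.filter_eq_nil_iff.mpr, List.map_nil]
        intro x _
        simp [hP]
      rw [hidx]
      simp only [List.foldl_nil]
      rw [List.foldl_fixed]
    have hB : letter_replace_alt word ll sec letter = (ll, sec) := by
      simp only [letter_replace_alt]
      have hstep : ∀ (S : List String) (p : Int × Char),
          (if String.ofList [p.2] = letter ∧ 2 * p.1 < (S.length : Int) then
            S.set (2 * p.1).toNat letter else S) = S := by
        intro S p
        rw [if_neg (fun h => hP p.2 h.1)]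
      have hfold : ∀ (prs : List (Int × Char)) (S : List String),
          prs.foldl (fun s p =>
            if String.ofList [p.2] = letter ∧ 2 * p.1 < (s.length : Int) then
              s.set (2 * p.1).toNat letter else s) S = S := by
        intro prs
        induction prs with
        | nil => intro S; rfl
        | cons p prs ih => intro S; rw [List.foldl_cons, hstep S p]; exact ih S
      rw [hfold, pv_join_singletons, String.ofList_toList]
    rw [hA, hB]

theorem letter_replace_changed : Claim_changed_letter_replace := by
  unfold Claim_changed_letter_replace; decide

theorem letter_replace_tight : Claim_exact_letter_replace := by
  intro word ll sec letter _hdom hD hEq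
  obtain ⟨hd1, hd2, hd3, hd4⟩ := hD
  obtain ⟨c, hc⟩ := List.length_eq_one_iff.mp hd2
  have h2 : (letter_replace word ll sec letter).2.toList
      = (letter_replace_alt word ll sec letter).2.toList := by rw [hEq]
  rw [pv_A_eval word ll sec letter c hc, pv_B_eval word ll sec letter c hc] at h2
  have hIx2 : (2 : Int) ∈ pvIndex word letter := pv_two_mem_index word letter c hc hd1
  have hm : 2 < sec.toList.length := by omega
  have h3 : ((PySem.List.pyRange 0 ((sec.toList.length : Int)) 1).foldl
        (fun cl y => if y ∈ pvIndex word letter then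
            cl.set y.toNat (if y = 2 then PySem.Chars.upperChar c else c) else cl)
        sec.toList)[2]?
      = ((PySem.List.pyRange 0 ((sec.toList.length : Int)) 1).foldl
        (fun cl y => if y ∈ pvIndex word letter then cl.set y.toNat c else cl)
        sec.toList)[2]? := by rw [h2]
  rw [pv_setfold_getElem? _ _ _ _ 2 hm (fun y hy => (PySem.List.mem_pyRange_one.mp hy).1),
    pv_setfold_getElem? _ _ _ _ 2 hm (fun y hy => (PySem.List.mem_pyRange_one.mp hy).1)] at h3
  have hcond : ((2 : Nat) : Int) ∈ pvIndex word letter ∧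
      ((2 : Nat) : Int) ∈ PySem.List.pyRange 0 ((sec.toList.length : Int)) 1 := by
    constructor
    · exact_mod_cast hIx2
    · exact PySem.List.mem_pyRange_one.mpr ⟨by omega, by exact_mod_cast hm⟩
  rw [if_pos hcond, if_pos hcond] at h3
  have hupc : PySem.Chars.upperChar c = c := by
    have h4 := Option.some.inj h3
    simpa using h4
  apply hd4
  apply String.toList_inj.mp
  rw [PySem.Str.toList_upper, hc]
  simp [PySem.Chars.upper, hupc]
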